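-- pv_equiv track=rewrite | github.com/SaideepGaunker/AI-couch | backend/app/services/difficulty_validation_service.py | _determine_overall_health_from_components
-- ===== SOURCE A (Python) =====
-- from typing import Dict, Any, List, Optional, Tuple
-- from enum import Enum
--
-- class HealthStatus(Enum):
--     """Health check status levels"""
--     HEALTHY = "healthy"
--     DEGRADED = "degraded"
--     UNHEALTHY = "unhealthy"
--     CRITICAL = "critical"
--
-- def _determine_overall_health_from_components(components: List[Dict[str, Any]]) -> str:
--     """Determine overall health from component health checks"""
--
--     statuses = [comp.get("status", HealthStatus.HEALTHY.value) for comp in components]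
--
--     if HealthStatus.CRITICAL.value in statuses:
--         return HealthStatus.CRITICAL.value
--     elif HealthStatus.UNHEALTHY.value in statuses:
--         return HealthStatus.UNHEALTHY.value
--     elif HealthStatus.DEGRADED.value in statuses:
--         return HealthStatus.DEGRADED.value
--     else:
--         return HealthStatus.HEALTHY.value
-- ===== SOURCE B (Python) =====
-- from typing import Dict, Any, List
-- from enum import Enum
--
-- class HealthStatus(Enum):
--     HEALTHY = "healthy"
--     DEGRADED = "degraded"
--     UNHEALTHY = "unhealthy"
--     CRITICAL = "critical"
--
-- _RANK = {
--     HealthStatus.HEALTHY.value: 0,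
--     HealthStatus.DEGRADED.value: 1,
--     HealthStatus.UNHEALTHY.value: 2,
--     HealthStatus.CRITICAL.value: 3,
-- }
-- _BY_RANK = [HealthStatus.HEALTHY.value, HealthStatus.DEGRADED.value,
--             HealthStatus.UNHEALTHY.value, HealthStatus.CRITICAL.value]
--
-- def _determine_overall_health_from_components(components: List[Dict[str, Any]]) -> str:
--     worst = 0
--     for comp in components:
--         status = comp.get("status", HealthStatus.HEALTHY.value)
--         worst = max(worst, _RANK.get(status, 0))
--     return _BY_RANK[worst]
-- ===== Notes on version B (the rewrite author's own statement) =====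
-- stated objective: alternative
-- what changed: Replaced the build-a-statuses-list plus three priority-ordered membership scans with a single running-max pass over a severity-rank table, mapping the maximum rank back to its status string.
import Mathlib
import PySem

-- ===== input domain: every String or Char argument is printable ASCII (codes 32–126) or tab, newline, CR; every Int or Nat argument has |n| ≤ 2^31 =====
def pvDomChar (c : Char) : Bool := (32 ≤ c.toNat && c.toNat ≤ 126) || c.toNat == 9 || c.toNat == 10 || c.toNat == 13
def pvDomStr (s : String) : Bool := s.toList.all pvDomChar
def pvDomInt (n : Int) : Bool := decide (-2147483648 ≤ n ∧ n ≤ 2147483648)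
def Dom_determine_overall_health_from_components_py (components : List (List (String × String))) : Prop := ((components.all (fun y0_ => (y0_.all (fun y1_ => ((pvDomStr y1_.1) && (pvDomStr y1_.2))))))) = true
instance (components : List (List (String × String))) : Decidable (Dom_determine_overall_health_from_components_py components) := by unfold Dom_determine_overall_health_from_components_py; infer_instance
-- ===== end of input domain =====

-- B replaces A's statuses-list + three membership scans by one running-max pass over a rank table (alternative decomposition, same cost).

-- ===== PORT A =====
-- statuses = [comp.get("status", "healthy") for comp in components]; then the membership chain
def determine_overall_health_from_components_py (components : List (List (String × String))) : String :=
  let statuses := components.map (fun comp => (PySem.Dict.mk comp).getD "status" "healthy")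
  if statuses.contains "critical" then "critical"
  else if statuses.contains "unhealthy" then "unhealthy"
  else if statuses.contains "degraded" then "degraded"
  else "healthy"

-- ===== PORT B =====
def pvRankTable : PySem.Dict String Nat :=
  PySem.Dict.mk [("healthy", 0), ("degraded", 1), ("unhealthy", 2), ("critical", 3)]

def pvByRank : List String := ["healthy", "degraded", "unhealthy", "critical"]

-- running max of _RANK.get(status, 0); final index into _BY_RANK is always in range (worst ≤ 3)
def determine_overall_health_from_components_py_alt (components : List (List (String × String))) : String :=
  let worst := components.foldl
    (fun worst comp =>
      max worst (pvRankTable.getD ((PySem.Dict.mk comp).getD "status" "healthy") 0)) 0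
  pvByRank.getD worst ""

-- ===== PRECONDITION & SPEC =====
def Spec_determine_overall_health_from_components_py (components : List (List (String × String))) (out : String) : Prop := out = determine_overall_health_from_components_py_alt components
instance (components : List (List (String × String))) (out : String) : Decidable (Spec_determine_overall_health_from_components_py components out) := by unfold Spec_determine_overall_health_from_components_py; infer_instance

-- ===== CLAIM (what is proved, stated in full; the proofs are below) =====
def Claim_equal_determine_overall_health_from_components_py : Prop := ∀ (components : List (List (String × String))), Dom_determine_overall_health_from_components_py components → Spec_determine_overall_health_from_components_py components (determine_overall_health_from_components_py components)

-- ===== LEMMAS AND PROOFS =====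

-- the status string read from one component
def pvStatus (comp : List (String × String)) : String :=
  (PySem.Dict.mk comp).getD "status" "healthy"

-- its rank in B's table
def pvR (comp : List (String × String)) : Nat :=
  pvRankTable.getD (pvStatus comp) 0

lemma pvRank_le_three (s : String) : pvRankTable.getD s 0 ≤ 3 := by
  simp only [pvRankTable, PySem.Dict.getD_eq_get?_getD, PySem.Dict.get?_mk_cons, beq_iff_eq]
  split_ifs <;> simp [PySem.Dict.get?]

lemma pvRank_eq_three_iff (s : String) : pvRankTable.getD s 0 = 3 ↔ s = "critical" := by
  simp only [pvRankTable, PySem.Dict.getD_eq_get?_getD, PySem.Dict.get?_mk_cons, beq_iff_eq]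
  split_ifs <;> simp_all [PySem.Dict.get?, eq_comm]

lemma pvRank_ge_two_iff (s : String) :
    2 ≤ pvRankTable.getD s 0 ↔ s = "unhealthy" ∨ s = "critical" := by
  simp only [pvRankTable, PySem.Dict.getD_eq_get?_getD, PySem.Dict.get?_mk_cons, beq_iff_eq]
  split_ifs <;> simp_all [PySem.Dict.get?, eq_comm]

lemma pvRank_ge_one_iff (s : String) :
    1 ≤ pvRankTable.getD s 0 ↔ s = "degraded" ∨ s = "unhealthy" ∨ s = "critical" := by
  simp only [pvRankTable, PySem.Dict.getD_eq_get?_getD, PySem.Dict.get?_mk_cons, beq_iff_eq]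
  split_ifs <;> simp_all [PySem.Dict.get?, eq_comm]

lemma pvR_le_three (comp : List (String × String)) : pvR comp ≤ 3 := pvRank_le_three _

lemma pvR_eq_three_iff (comp : List (String × String)) :
    pvR comp = 3 ↔ pvStatus comp = "critical" := pvRank_eq_three_iff _

lemma pvR_ge_two_iff (comp : List (String × String)) :
    2 ≤ pvR comp ↔ pvStatus comp = "unhealthy" ∨ pvStatus comp = "critical" := pvRank_ge_two_iff _

lemma pvR_ge_one_iff (comp : List (String × String)) :
    1 ≤ pvR comp ↔ pvStatus comp = "degraded" ∨ pvStatus comp = "unhealthy" ∨ pvStatus comp = "critical" :=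
  pvRank_ge_one_iff _

-- B's loop with an arbitrary accumulator
lemma pv_foldl_max_acc (l : List (List (String × String))) (a : Nat) :
    l.foldl (fun w c => max w (pvR c)) a = max a (l.foldl (fun w c => max w (pvR c)) 0) := by
  induction l generalizing a with
  | nil => simp
  | cons c t ih =>
    simp only [List.foldl_cons]
    rw [ih (max a (pvR c)), ih (max 0 (pvR c))]
    omega

lemma pv_foldl_max_ge_iff (l : List (List (String × String))) (k : Nat) (hk : 1 ≤ k) :
    k ≤ l.foldl (fun w c => max w (pvR c)) 0 ↔ ∃ c ∈ l, k ≤ pvR c := by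
  induction l with
  | nil => simp; omega
  | cons c t ih =>
    simp only [List.foldl_cons]
    rw [pv_foldl_max_acc t (max 0 (pvR c))]
    constructor
    · intro h
      by_cases hc : k ≤ pvR c
      · exact ⟨c, by simp, hc⟩
      · have : k ≤ t.foldl (fun w c => max w (pvR c)) 0 := by omega
        obtain ⟨d, hd, hkd⟩ := ih.mp this
        exact ⟨d, by simp [hd], hkd⟩
    · rintro ⟨d, hd, hkd⟩
      rcases List.mem_cons.mp hd with rfl | hdt
      · omega
      · have := ih.mpr ⟨d, hdt, hkd⟩; omega

lemma pv_foldl_max_le (l : List (List (String × String))) :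
    l.foldl (fun w c => max w (pvR c)) 0 ≤ 3 := by
  induction l with
  | nil => simp
  | cons c t ih =>
    simp only [List.foldl_cons]
    rw [pv_foldl_max_acc t (max 0 (pvR c))]
    have := pvR_le_three c
    omega

lemma pv_contains_iff (l : List (List (String × String))) (s : String) :
    (l.map pvStatus).contains s = true ↔ ∃ c ∈ l, pvStatus c = s := by
  simp

-- ===== VERDICT (by name: the statement is the Claim_ definition above) =====
theorem determine_overall_health_from_components_py_spec : Claim_equal_determine_overall_health_from_components_py := by
  intro components _
  unfold Spec_determine_overall_health_from_components_py
  unfold determine_overall_health_from_components_py determine_overall_health_from_components_py_alt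
  show (if (components.map pvStatus).contains "critical" then "critical"
        else if (components.map pvStatus).contains "unhealthy" then "unhealthy"
        else if (components.map pvStatus).contains "degraded" then "degraded"
        else "healthy")
      = pvByRank.getD (components.foldl (fun w c => max w (pvR c)) 0) ""
  have h3 := pv_foldl_max_ge_iff components 3 (by omega)
  have h2 := pv_foldl_max_ge_iff components 2 (by omega)
  have h1 := pv_foldl_max_ge_iff components 1 (by omega)
  have hMle := pv_foldl_max_le components
  rcases (by omega : components.foldl (fun w c => max w (pvR c)) 0 = 0 ∨
      components.foldl (fun w c => max w (pvR c)) 0 = 1 ∨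
      components.foldl (fun w c => max w (pvR c)) 0 = 2 ∨
      components.foldl (fun w c => max w (pvR c)) 0 = 3) with hm | hm | hm | hm <;>
    rw [hm] at h3 h2 h1 ⊢
  · -- M = 0 : no status of rank ≥ 1
    have hno : ∀ s, s ∈ ["critical", "unhealthy", "degraded"] →
        (components.map pvStatus).contains s = false := by
      intro s hs
      rw [Bool.eq_false_iff]
      intro hcont
      obtain ⟨c, hc, hcs⟩ := (pv_contains_iff components s).mp hcont
      have : 1 ≤ pvR c := (pvR_ge_one_iff c).mpr (by fin_cases hs <;> simp_all)
      have := h1.mpr ⟨c, hc, this⟩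
      omega
    rw [if_neg, if_neg, if_neg]
    · rfl
    · exact Bool.eq_false_iff.mp (hno "degraded" (by simp))
    · exact Bool.eq_false_iff.mp (hno "unhealthy" (by simp))
    · exact Bool.eq_false_iff.mp (hno "critical" (by simp))
  · -- M = 1 : some degraded, nothing worse
    obtain ⟨c, hc, hr⟩ := h1.mp (by omega)
    have hdeg : pvStatus c = "degraded" := by
      rcases (pvR_ge_one_iff c).mp hr with h | h | h
      · exact h
      · exact absurd (h2.mpr ⟨c, hc, (pvR_ge_two_iff c).mpr (Or.inl h)⟩) (by omega)
      · exact absurd (h2.mpr ⟨c, hc, (pvR_ge_two_iff c).mpr (Or.inr h)⟩) (by omega)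
    have hno : ∀ s, s = "critical" ∨ s = "unhealthy" →
        (components.map pvStatus).contains s = false := by
      intro s hs
      rw [Bool.eq_false_iff]
      intro hcont
      obtain ⟨d, hd, hds⟩ := (pv_contains_iff components s).mp hcont
      have : 2 ≤ pvR d := (pvR_ge_two_iff d).mpr (by rcases hs with rfl | rfl <;> simp_all)
      have := h2.mpr ⟨d, hd, this⟩
      omega
    rw [if_neg, if_neg, if_pos ((pv_contains_iff components "degraded").mpr ⟨c, hc, hdeg⟩)]
    · rfl
    · exact Bool.eq_false_iff.mp (hno "unhealthy" (Or.inr rfl))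
    · exact Bool.eq_false_iff.mp (hno "critical" (Or.inl rfl))
  · -- M = 2 : some unhealthy, no critical
    have hnocrit : (components.map pvStatus).contains "critical" = false := by
      rw [Bool.eq_false_iff]
      intro hcont
      obtain ⟨d, hd, hds⟩ := (pv_contains_iff components "critical").mp hcont
      have := h3.mpr ⟨d, hd, le_of_eq ((pvR_eq_three_iff d).mpr hds).symm⟩
      omega
    obtain ⟨c, hc, hr⟩ := h2.mp (by omega)
    have hun : pvStatus c = "unhealthy" := by
      rcases (pvR_ge_two_iff c).mp hr with h | h
      · exact h
      · exact absurd (h3.mpr ⟨c, hc, le_of_eq ((pvR_eq_three_iff c).mpr h).symm⟩) (by omega)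
    rw [if_neg, if_pos ((pv_contains_iff components "unhealthy").mpr ⟨c, hc, hun⟩)]
    · rfl
    · exact Bool.eq_false_iff.mp hnocrit
  · -- M = 3 : some critical
    obtain ⟨c, hc, hr⟩ := h3.mp (by omega)
    have hcrit : pvStatus c = "critical" :=
      (pvR_eq_three_iff c).mp (le_antisymm (pvR_le_three c) hr)
    rw [if_pos ((pv_contains_iff components "critical").mpr ⟨c, hc, hcrit⟩)]
    rfl
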